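-- pv_equiv track=rewrite | github.com/loponly/ai-video-gen | tools/script/optimize_script_for_platform.py | _make_trendy_language
-- ===== SOURCE A (Python) =====
-- def _make_trendy_language(script: str, level: str) -> str:
--     """Make language more trendy and TikTok-appropriate."""
--
--     replacements = {
--         "very": "literally",
--         "really": "actually",
--         "amazing": "iconic",
--         "great": "chef's kiss",
--         "good": "slaps",
--         "bad": "not it",
--         "interesting": "lowkey fascinating"
--     }
--
--     optimized = script
--     if level in ["medium", "high", "maximum"]:
--         for old, new in replacements.items():
--             optimized = optimized.replace(old, new)
--
--     return optimized
-- ===== SOURCE B (Python) =====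
-- def _make_trendy_language(script: str, level: str) -> str:
--     """Make language more trendy and TikTok-appropriate."""
--
--     if level not in ("medium", "high", "maximum"):
--         return script
--
--     pairs = [
--         ("very", "literally"),
--         ("really", "actually"),
--         ("amazing", "iconic"),
--         ("great", "chef's kiss"),
--         ("good", "slaps"),
--         ("bad", "not it"),
--         ("interesting", "lowkey fascinating"),
--     ]
--
--     def substitute(text, remaining):
--         if not remaining:
--             return text
--         old, new = remaining[0]
--         return substitute(new.join(text.split(old)), remaining[1:])
--
--     return substitute(script, pairs)
-- ===== Notes on version B (the rewrite author's own statement) =====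
-- stated objective: alternative
-- what changed: Each sequential str.replace pass is replaced by the split/join idiom new.join(text.split(old)) -- the text is cut into segments at the keyword and re-glued with the replacement -- applied by structural recursion over an explicit pair list with an early return, instead of a loop over a dict mutating an accumulator via replace.
import Mathlib
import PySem

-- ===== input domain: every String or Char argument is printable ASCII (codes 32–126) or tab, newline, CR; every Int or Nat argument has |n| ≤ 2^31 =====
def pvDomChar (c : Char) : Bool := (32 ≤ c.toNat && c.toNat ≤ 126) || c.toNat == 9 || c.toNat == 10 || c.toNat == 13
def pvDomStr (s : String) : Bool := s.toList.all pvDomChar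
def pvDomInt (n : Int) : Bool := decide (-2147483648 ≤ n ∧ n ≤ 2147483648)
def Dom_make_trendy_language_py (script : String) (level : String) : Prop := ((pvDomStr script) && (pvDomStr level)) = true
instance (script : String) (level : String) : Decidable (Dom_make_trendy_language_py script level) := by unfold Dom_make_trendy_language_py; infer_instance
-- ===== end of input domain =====

-- B replaces each sequential str.replace pass with the split/join idiom applied by recursion over a pair list (objective: alternative, same cost).

-- ===== PORT A =====
def make_trendy_language_py (script : String) (level : String) : String :=
  let replacements : PySem.Dict String String := PySem.Dict.ofList
    [("very", "literally"), ("really", "actually"), ("amazing", "iconic"),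
     ("great", "chef's kiss"), ("good", "slaps"), ("bad", "not it"),
     ("interesting", "lowkey fascinating")]
  let optimized := script
  if ["medium", "high", "maximum"].contains level then
    replacements.items.foldl (fun opt p => PySem.Str.replace opt p.1 p.2) optimized
  else
    optimized

-- ===== PORT B =====
-- new.join(text.split(old)); Str.split? is none only for old = "", which never occurs (all keys are nonempty literals), so getD is unreachable
def pvSubstitute : String → List (String × String) → String
  | text, [] => text
  | text, (old, new) :: rest =>
      pvSubstitute (PySem.Str.join new ((PySem.Str.split? text old).getD [text])) rest

def make_trendy_language_py_alt (script : String) (level : String) : String :=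
  if !(["medium", "high", "maximum"].contains level) then
    script
  else
    pvSubstitute script
      [("very", "literally"), ("really", "actually"), ("amazing", "iconic"),
       ("great", "chef's kiss"), ("good", "slaps"), ("bad", "not it"),
       ("interesting", "lowkey fascinating")]

-- ===== PRECONDITION & SPEC =====
def Spec_make_trendy_language_py (script : String) (level : String) (out : String) : Prop := out = make_trendy_language_py_alt script level
instance (script : String) (level : String) (out : String) : Decidable (Spec_make_trendy_language_py script level out) := by unfold Spec_make_trendy_language_py; infer_instance

-- ===== CLAIM (what is proved, stated in full; the proofs are below) =====
def Claim_equal_make_trendy_language_py : Prop := ∀ (script : String) (level : String), Dom_make_trendy_language_py script level → Spec_make_trendy_language_py script level (make_trendy_language_py script level)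

-- ===== LEMMAS AND PROOFS =====

-- the list of pieces `text.split(old)` produces, as a standalone fuel recursion both go-loops are related to
def pvPieces (sep : List Char) : Nat → List Char → List (List Char)
  | 0, l => [l]
  | _ + 1, [] => [[]]
  | f + 1, c :: t =>
    if sep.isPrefixOf (c :: t) then [] :: pvPieces sep f (List.drop sep.length (c :: t))
    else
      match pvPieces sep f t with
      | [] => [[c]]
      | p :: ps => (c :: p) :: ps

theorem pvPieces_ne_nil (sep : List Char) (fuel : Nat) (l : List Char) : pvPieces sep fuel l ≠ [] := by
  match fuel, l with
  | 0, l => simp [pvPieces]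
  | f + 1, [] => simp [pvPieces]
  | f + 1, c :: t =>
    unfold pvPieces
    split
    · simp
    · split <;> simp

theorem pvSplitOn_go_eq (sep : List Char) (fuel : Nat) (l cur : List Char) (acc : List (List Char)) :
    PySem.Chars.splitOn.go sep fuel l cur acc =
      acc.reverse ++ (match pvPieces sep fuel l with
        | [] => []
        | p :: ps => (cur.reverse ++ p) :: ps) := by
  induction fuel generalizing l cur acc with
  | zero => simp [PySem.Chars.splitOn.go, pvPieces]
  | succ f ih =>
    match l with
    | [] => simp [PySem.Chars.splitOn.go, pvPieces]
    | c :: t =>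
      rw [PySem.Chars.splitOn.go]
      by_cases hp : sep.isPrefixOf (c :: t)
      · rw [if_pos hp, ih]
        have hne := pvPieces_ne_nil sep f (List.drop sep.length (c :: t))
        obtain ⟨p, ps, hP⟩ := List.exists_cons_of_ne_nil hne
        simp [pvPieces, hp, hP]
      · rw [if_neg hp, ih]
        have hne := pvPieces_ne_nil sep f t
        obtain ⟨p, ps, hP⟩ := List.exists_cons_of_ne_nil hne
        simp [pvPieces, hp, hP]

theorem pvReplace_go_eq (old new : List Char) (fuel : Nat) (l acc : List Char) :
    PySem.Chars.replace.go old new fuel l acc =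
      acc.reverse ++ PySem.Chars.join new (pvPieces old fuel l) := by
  induction fuel generalizing l acc with
  | zero => simp [PySem.Chars.replace.go, pvPieces, PySem.Chars.join_singleton]
  | succ f ih =>
    match l with
    | [] => simp [PySem.Chars.replace.go, pvPieces, PySem.Chars.join_singleton]
    | c :: t =>
      rw [PySem.Chars.replace.go]
      by_cases hp : old.isPrefixOf (c :: t)
      · rw [if_pos hp, ih]
        have hne := pvPieces_ne_nil old f (List.drop old.length (c :: t))
        obtain ⟨p, ps, hP⟩ := List.exists_cons_of_ne_nil hne
        simp [pvPieces, hp, hP, PySem.Chars.join_cons_cons]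
      · rw [if_neg hp, ih]
        have hne := pvPieces_ne_nil old f t
        obtain ⟨p, ps, hP⟩ := List.exists_cons_of_ne_nil hne
        match ps, hP with
        | [], hP => simp [pvPieces, hp, hP, PySem.Chars.join_singleton]
        | q :: qs, hP => simp [pvPieces, hp, hP, PySem.Chars.join_cons_cons]

theorem pvPieces_fuel (sep : List Char) (hsep : sep ≠ []) :
    ∀ fuel l, List.length l ≤ fuel → pvPieces sep fuel l = pvPieces sep l.length l := by
  intro fuel
  induction fuel using Nat.strong_induction_on with
  | _ fuel ih =>
    intro l hl
    match fuel, l with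
    | 0, l =>
      have : l = [] := List.eq_nil_of_length_eq_zero (Nat.le_zero.mp hl)
      subst this; rfl
    | f + 1, [] => simp [pvPieces]
    | f + 1, c :: t =>
      have ht : t.length ≤ f := by simpa using hl
      by_cases hp : sep.isPrefixOf (c :: t)
      · have hd : (List.drop sep.length (c :: t)).length ≤ t.length := by
          have : 1 ≤ sep.length := List.length_pos_of_ne_nil hsep
          simp only [List.length_drop, List.length_cons]
          omega
        have h1 := ih f (by omega) (List.drop sep.length (c :: t)) (le_trans hd ht)
        have h2 := ih t.length (by omega) (List.drop sep.length (c :: t)) hd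
        simp only [pvPieces, hp, if_pos, List.length_cons]
        rw [h1, h2]
      · have h1 := ih f (by omega) t ht
        have h2 := ih t.length (by omega) t (le_refl _)
        simp only [pvPieces, hp, List.length_cons]
        rw [h1, h2]
        simp

theorem pvChars_replace_eq_join_splitOn (s old new : List Char) (h : old ≠ []) :
    PySem.Chars.replace s old new = PySem.Chars.join new (PySem.Chars.splitOn s old) := by
  have hemp : old.isEmpty = false := by simpa [List.isEmpty_iff] using h
  rw [PySem.Chars.replace, hemp, PySem.Chars.splitOn]
  simp only [Bool.false_eq_true, if_false]
  rw [pvReplace_go_eq, pvSplitOn_go_eq]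
  have hne := pvPieces_ne_nil old (s.length + 1) s
  obtain ⟨p, ps, hP⟩ := List.exists_cons_of_ne_nil hne
  rw [pvPieces_fuel old h (s.length + 1) s (by omega), pvPieces_fuel old h s.length s (le_refl _)] at *
  simp [hP]

theorem pvStr_replace_eq (s old new : String) (h : old ≠ "") :
    PySem.Str.replace s old new = PySem.Str.join new ((PySem.Str.split? s old).getD [s]) := by
  have hl : old.toList ≠ [] := by
    intro hc; apply h
    have := congrArg String.ofList hc
    simpa using this
  have hemp : old.toList.isEmpty = false := by simpa [List.isEmpty_iff] using hl
  apply String.toList_inj.mp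
  rw [PySem.Str.toList_replace, pvChars_replace_eq_join_splitOn _ _ _ hl]
  rw [PySem.Str.split?, PySem.Chars.split?, hemp]
  simp only [Bool.false_eq_true, if_false, Option.map_some, Option.getD_some]
  rw [PySem.Str.toList_join]
  simp [List.map_map, Function.comp_def]

theorem pvFoldl_replace_eq_substitute (pairs : List (String × String)) (s : String)
    (h : ∀ p ∈ pairs, p.1 ≠ "") :
    pairs.foldl (fun opt p => PySem.Str.replace opt p.1 p.2) s = pvSubstitute s pairs := by
  induction pairs generalizing s with
  | nil => rfl
  | cons hd tl ih =>
    obtain ⟨old, new⟩ := hd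
    simp only [List.foldl_cons, pvSubstitute]
    rw [pvStr_replace_eq s old new (h (old, new) (List.mem_cons_self))]
    exact ih _ (fun p hp => h p (List.mem_cons_of_mem _ hp))

-- ===== VERDICT (by name: the statement is the Claim_ definition above) =====
theorem make_trendy_language_py_spec : Claim_equal_make_trendy_language_py := by
  intro script level _
  unfold Spec_make_trendy_language_py make_trendy_language_py make_trendy_language_py_alt
  by_cases h : ["medium", "high", "maximum"].contains level
  · rw [if_pos h]
    simp only [h, Bool.not_true, Bool.false_eq_true, if_false]
    rw [pvFoldl_replace_eq_substitute _ _ (by decide)]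
    have hitems : (PySem.Dict.ofList
        [("very", "literally"), ("really", "actually"), ("amazing", "iconic"),
         ("great", "chef's kiss"), ("good", "slaps"), ("bad", "not it"),
         ("interesting", "lowkey fascinating")] : PySem.Dict String String).items =
        [("very", "literally"), ("really", "actually"), ("amazing", "iconic"),
         ("great", "chef's kiss"), ("good", "slaps"), ("bad", "not it"),
         ("interesting", "lowkey fascinating")] := by decide
    rw [hitems]
  · rw [if_neg h]
    have hc : ["medium", "high", "maximum"].contains level = false := by simpa using h
    rw [hc]
    simp
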